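-- pv_equiv track=rewrite | github.com/lucastuxnet/Bitcoin | Selfish/mineracao_egoista.py | contar_mineracoes_sequenciais
-- ===== SOURCE A (Python) =====
-- def contar_mineracoes_sequenciais(mp, dados):
--     sequencias = 0
--     max_sequencia = 0
--     mineradores_sequenciais = []
--     for poder in dados[mp]:
--         if poder > 0:
--             sequencias += 1
--             mineradores_sequenciais.append(mp)
--             if sequencias > max_sequencia:
--                 max_sequencia = sequencias
--         else:
--             sequencias = 0
--     return max_sequencia, mineradores_sequenciais
-- ===== SOURCE B (Python) =====
-- def _maxrun(xs):
--     # length of the leading run of positives; recurse past the first non-positive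
--     i = 0
--     while i < len(xs) and xs[i] > 0:
--         i += 1
--     if i == len(xs):
--         return i
--     return max(i, _maxrun(xs[i + 1:]))
--
-- def contar_mineracoes_sequenciais(mp, dados):
--     poderes = dados[mp]
--     return _maxrun(poderes), [mp] * sum(1 for p in poderes if p > 0)
-- ===== Notes on version B (the rewrite author's own statement) =====
-- stated objective: alternative
-- what changed: A keeps a running counter/maximum/list in one accumulator loop; B recursively splits the sequence at the first non-positive element (leading-run length, then recurse on the remainder) and builds the list as [mp] * (count of positives) instead of appending per element.
import Mathlib
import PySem

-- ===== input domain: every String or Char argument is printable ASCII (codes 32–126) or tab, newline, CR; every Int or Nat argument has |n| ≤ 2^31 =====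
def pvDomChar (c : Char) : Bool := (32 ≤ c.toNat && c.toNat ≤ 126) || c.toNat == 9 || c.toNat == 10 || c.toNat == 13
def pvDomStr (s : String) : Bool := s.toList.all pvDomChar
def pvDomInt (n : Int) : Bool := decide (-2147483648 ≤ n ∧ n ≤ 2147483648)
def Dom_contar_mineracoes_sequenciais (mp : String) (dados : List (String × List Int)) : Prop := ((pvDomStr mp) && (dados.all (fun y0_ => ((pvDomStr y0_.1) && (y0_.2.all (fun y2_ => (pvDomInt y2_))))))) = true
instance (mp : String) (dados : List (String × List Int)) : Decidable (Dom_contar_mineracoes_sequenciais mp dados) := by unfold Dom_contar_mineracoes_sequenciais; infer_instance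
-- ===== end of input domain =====

-- B changes the decomposition: recursive split at the first non-positive element plus a
-- positive-count replicate, instead of A's single accumulator loop; same cost (objective: alternative).

-- ===== PORT A =====
-- loop body of A's for-loop; state = (sequencias, max_sequencia, mineradores_sequenciais)
def pvStepA (mp : String) (st : Int × Int × List String) (poder : Int) : Int × Int × List String :=
  if poder > 0 then
    (st.1 + 1, if st.1 + 1 > st.2.1 then st.1 + 1 else st.2.1, st.2.2 ++ [mp])
  else (0, st.2.1, st.2.2)

def contar_mineracoes_sequenciais (mp : String) (dados : List (String × List Int)) : Int × List String :=
  match PySem.Dict.get? (PySem.Dict.mk dados) mp with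
  | none => (0, [])  -- KeyError in Python; excluded by Pre_
  | some lst =>
    let st := lst.foldl (pvStepA mp) (0, 0, [])
    (st.2.1, st.2.2)

-- ===== PORT B =====
def pvPos (p : Int) : Bool := decide (p > 0)

-- Source B's _maxrun: leading-run length, then recurse past the first non-positive
def pvMaxRun (xs : List Int) : Int :=
  match hdw : xs.dropWhile pvPos with
  | [] => (xs.length : Int)
  | _ :: rest =>
    max ((xs.takeWhile pvPos).length : Int) (pvMaxRun rest)
termination_by xs.length
decreasing_by
  have h1 : (xs.dropWhile pvPos).length ≤ xs.length := List.length_dropWhile_le _ _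
  rw [hdw] at h1
  simp at h1
  omega

def contar_mineracoes_sequenciais_alt (mp : String) (dados : List (String × List Int)) : Int × List String :=
  match PySem.Dict.get? (PySem.Dict.mk dados) mp with
  | none => (0, [])  -- KeyError in Python; excluded by Pre_
  | some poderes =>
    (pvMaxRun poderes, List.replicate (poderes.countP pvPos) mp)

-- ===== PRECONDITION & SPEC =====
-- Pre_ excludes exactly the inputs where dados[mp] raises KeyError (mp not a key of dados)
def Pre_contar_mineracoes_sequenciais (mp : String) (dados : List (String × List Int)) : Prop :=
  (PySem.Dict.get? (PySem.Dict.mk dados) mp).isSome = true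
instance (mp : String) (dados : List (String × List Int)) : Decidable (Pre_contar_mineracoes_sequenciais mp dados) := by unfold Pre_contar_mineracoes_sequenciais; infer_instance

def pvWitness_contar_mineracoes_sequenciais : String × (List (String × List Int)) :=
  ("m", [("m", [1, -1, 1, 2])])

def Spec_contar_mineracoes_sequenciais (mp : String) (dados : List (String × List Int)) (out : Int × List String) : Prop := out = contar_mineracoes_sequenciais_alt mp dados
instance (mp : String) (dados : List (String × List Int)) (out : Int × List String) : Decidable (Spec_contar_mineracoes_sequenciais mp dados out) := by unfold Spec_contar_mineracoes_sequenciais; infer_instance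

-- ===== CLAIM (what is proved, stated in full; the proofs are below) =====
def Claim_equal_contar_mineracoes_sequenciais : Prop := ∀ (mp : String) (dados : List (String × List Int)), Dom_contar_mineracoes_sequenciais mp dados → Pre_contar_mineracoes_sequenciais mp dados → Spec_contar_mineracoes_sequenciais mp dados (contar_mineracoes_sequenciais mp dados)

-- ===== LEMMAS AND PROOFS =====

-- proof helper: pvMaxRun with the leading run extended by a carry-in of length seq
def pvMaxRun2 (seq : Int) (xs : List Int) : Int :=
  match xs.dropWhile pvPos with
  | [] => seq + (xs.length : Int)
  | _ :: rest => max (seq + ((xs.takeWhile pvPos).length : Int)) (pvMaxRun rest)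

theorem pvMaxRun_eq (xs : List Int) : pvMaxRun xs = pvMaxRun2 0 xs := by
  unfold pvMaxRun pvMaxRun2
  cases h : xs.dropWhile pvPos with
  | nil => simp
  | cons y rest => simp

theorem foldA_max (mp : String) (xs : List Int) : ∀ (seq mx : Int) (ms : List String),
    0 ≤ seq → seq ≤ mx → (xs.foldl (pvStepA mp) (seq, mx, ms)).2.1 = max mx (pvMaxRun2 seq xs) := by
  induction xs with
  | nil => intro seq mx ms h0 hle; simp [pvMaxRun2]; omega
  | cons x t ih =>
    intro seq mx ms h0 hle
    by_cases hx : x > 0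
    · have hpos : pvPos x = true := by simp [pvPos]; omega
      have hstep : pvStepA mp (seq, mx, ms) x
          = (seq + 1, if seq + 1 > mx then seq + 1 else mx, ms ++ [mp]) := by
        simp [pvStepA, hx]
      rw [List.foldl_cons, hstep]
      have hle' : seq + 1 ≤ (if seq + 1 > mx then seq + 1 else mx) := by split <;> omega
      rw [ih (seq + 1) _ _ (by omega) hle']
      unfold pvMaxRun2
      rw [List.dropWhile_cons_of_pos hpos, List.takeWhile_cons_of_pos hpos]
      cases h : t.dropWhile pvPos with
      | nil =>
        have : t.takeWhile pvPos = t := by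
          have := List.takeWhile_append_dropWhile (p := pvPos) (l := t)
          rw [h] at this; simpa using this
        rw [this]
        simp only [List.length_cons]
        push_cast
        split <;> omega
      | cons y rest =>
        simp only [List.length_cons]
        push_cast
        split <;> omega
    · have hpos : pvPos x = false := by simp [pvPos]; omega
      have hstep : pvStepA mp (seq, mx, ms) x = (0, mx, ms) := by
        simp [pvStepA, hx]
      rw [List.foldl_cons, hstep]
      rw [ih 0 mx ms (by omega) (by omega)]
      rw [← pvMaxRun_eq]
      unfold pvMaxRun2
      rw [List.dropWhile_cons_of_neg (by simp [hpos]), List.takeWhile_cons_of_neg (by simp [hpos])]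
      simp only [List.length_nil]
      push_cast
      omega

theorem foldA_list (mp : String) (xs : List Int) : ∀ (seq mx : Int) (ms : List String),
    (xs.foldl (pvStepA mp) (seq, mx, ms)).2.2 = ms ++ List.replicate (xs.countP pvPos) mp := by
  induction xs with
  | nil => intro seq mx ms; simp
  | cons x t ih =>
    intro seq mx ms
    by_cases hx : x > 0
    · have hpos : pvPos x = true := by simp [pvPos]; omega
      have hstep : pvStepA mp (seq, mx, ms) x
          = (seq + 1, if seq + 1 > mx then seq + 1 else mx, ms ++ [mp]) := by
        simp [pvStepA, hx]
      rw [List.foldl_cons, hstep, ih]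
      rw [List.countP_cons, hpos]
      simp [List.replicate_succ]
    · have hpos : pvPos x = false := by simp [pvPos]; omega
      have hstep : pvStepA mp (seq, mx, ms) x = (0, mx, ms) := by
        simp [pvStepA, hx]
      rw [List.foldl_cons, hstep, ih]
      rw [List.countP_cons, hpos]
      simp

-- ===== VERDICT (by name: the statement is the Claim_ definition above) =====
theorem contar_mineracoes_sequenciais_spec : Claim_equal_contar_mineracoes_sequenciais := by
  intro mp dados _hdom hpre
  unfold Spec_contar_mineracoes_sequenciais
  unfold contar_mineracoes_sequenciais contar_mineracoes_sequenciais_alt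
  cases h : PySem.Dict.get? (PySem.Dict.mk dados) mp with
  | none =>
    exfalso
    unfold Pre_contar_mineracoes_sequenciais at hpre
    rw [h] at hpre; simp at hpre
  | some lst =>
    simp only []
    refine Prod.ext ?_ ?_
    · show (lst.foldl (pvStepA mp) (0, 0, [])).2.1 = pvMaxRun lst
      rw [foldA_max mp lst 0 0 [] (le_refl 0) (le_refl 0), pvMaxRun_eq]
      have : (0 : Int) ≤ pvMaxRun2 0 lst := by
        rw [← pvMaxRun_eq]
        unfold pvMaxRun
        cases h2 : lst.dropWhile pvPos <;> simp
      omega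
    · show (lst.foldl (pvStepA mp) (0, 0, [])).2.2 = List.replicate (lst.countP pvPos) mp
      rw [foldA_list]; simp
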